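-- pv_equiv track=rewrite | github.com/Kataurovaa/crypt | crypt1.0/crypt1.0.py | to_10
-- ===== SOURCE A (Python) =====
-- def to_10(inp, osn):
--     p = 0
--     digit = 0
--     for i in range(len(inp)-1, -1, -1):
--         tmp = ord(inp[i])
--         if tmp >= 65:
--             digit += (tmp-55) * osn**p
--         else:
--             digit += (tmp-48) * osn**p
--         p += 1
--     return digit
-- ===== SOURCE B (Python) =====
-- def to_10(inp, osn):
--     # Horner's rule: one multiply-add per character, left to right.
--     digit = 0
--     for ch in inp:
--         t = ord(ch)
--         digit = digit * osn + (t - 55 if t >= 65 else t - 48)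
--     return digit
-- ===== Notes on version B (the rewrite author's own statement) =====
-- stated objective: faster
-- what changed: Replaced the right-to-left loop that recomputes osn**p for every position with a single left-to-right Horner pass (digit = digit*osn + value), removing all exponentiations.
import Mathlib
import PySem

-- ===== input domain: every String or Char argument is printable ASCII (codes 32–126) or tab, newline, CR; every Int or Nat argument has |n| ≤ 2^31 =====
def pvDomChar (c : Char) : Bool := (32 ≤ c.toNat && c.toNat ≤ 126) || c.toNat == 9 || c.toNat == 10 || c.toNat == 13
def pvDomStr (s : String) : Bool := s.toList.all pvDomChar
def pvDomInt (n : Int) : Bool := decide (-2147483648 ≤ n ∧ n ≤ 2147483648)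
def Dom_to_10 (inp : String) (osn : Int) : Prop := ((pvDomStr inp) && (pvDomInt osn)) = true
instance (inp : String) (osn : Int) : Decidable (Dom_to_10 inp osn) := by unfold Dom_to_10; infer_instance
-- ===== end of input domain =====

-- B replaces A's right-to-left loop with per-step exponentiation osn**p by a single
-- left-to-right Horner pass (digit = digit*osn + value); return values agree everywhere.

-- ===== PORT A =====
-- literal port: p and digit as loop state, indices from range(len(inp)-1, -1, -1);
-- inp[i] via pyGetD (the index is always in range, so the default is never used)
def to_10 (inp : String) (osn : Int) : Int :=
  let s := inp.toList
  ((PySem.List.pyRange (PySem.Str.len inp - 1) (-1) (-1)).foldl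
    (fun (st : Int × Int) i =>
      let tmp : Int := (PySem.List.pyGetD s i ' ').toNat
      if tmp ≥ 65 then (st.1 + 1, st.2 + (tmp - 55) * osn ^ st.1.toNat)
      else (st.1 + 1, st.2 + (tmp - 48) * osn ^ st.1.toNat))
    (0, 0)).2

-- ===== PORT B =====
def to_10_alt (inp : String) (osn : Int) : Int :=
  inp.toList.foldl
    (fun digit c =>
      let t : Int := c.toNat
      digit * osn + (if t ≥ 65 then t - 55 else t - 48)) 0

-- ===== PRECONDITION & SPEC =====
def Spec_to_10 (inp : String) (osn : Int) (out : Int) : Prop := out = to_10_alt inp osn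
instance (inp : String) (osn : Int) (out : Int) : Decidable (Spec_to_10 inp osn out) := by unfold Spec_to_10; infer_instance

-- ===== CLAIM (what is proved, stated in full; the proofs are below) =====
def Claim_equal_to_10 : Prop := ∀ (inp : String) (osn : Int), Dom_to_10 inp osn → Spec_to_10 inp osn (to_10 inp osn)

-- ===== LEMMAS AND PROOFS =====

-- A's loop body and B's Horner fold, over List Char
def pvStepA (s : List Char) (osn : Int) (st : Int × Int) (i : Int) : Int × Int :=
  let tmp : Int := (PySem.List.pyGetD s i ' ').toNat
  if tmp ≥ 65 then (st.1 + 1, st.2 + (tmp - 55) * osn ^ st.1.toNat)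
  else (st.1 + 1, st.2 + (tmp - 48) * osn ^ st.1.toNat)

def pvHorner (osn : Int) (s : List Char) : Int :=
  s.foldl (fun digit c =>
    let t : Int := c.toNat
    digit * osn + (if t ≥ 65 then t - 55 else t - 48)) 0

-- A's loop over s, started at power p0 and accumulator d0, computes d0 + osn^p0 * Horner s.
theorem pvFoldA (osn : Int) (s : List Char) (p0 : Nat) (d0 : Int) :
    (PySem.List.pyRange ((s.length : Int) - 1) (-1) (-1)).foldl (pvStepA s osn) ((p0 : Int), d0)
      = (((p0 + s.length : Nat) : Int), d0 + osn ^ p0 * pvHorner osn s) := by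
  induction s using List.reverseRecOn generalizing p0 d0 with
  | nil =>
      rw [PySem.List.pyRange_neg_one_eq_nil (by simp)]
      simp [pvHorner]
  | append_singleton s c ih =>
      have hcons : PySem.List.pyRange (((s ++ [c]).length : Int) - 1) (-1) (-1)
          = (s.length : Int) :: PySem.List.pyRange ((s.length : Int) - 1) (-1) (-1) := by
        rw [show ((s ++ [c]).length : Int) - 1 = (s.length : Int) by
              simp]
        exact PySem.List.pyRange_neg_one_cons (by omega)
      have hget : PySem.List.pyGetD (s ++ [c]) ((s.length : Int)) ' ' = c := by
        simp [PySem.List.pyGetD]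
      have hstep : pvStepA (s ++ [c]) osn ((p0 : Int), d0) ((s.length : Int))
          = (((p0 + 1 : Nat) : Int),
             d0 + (if ((c.toNat : Int) ≥ 65) then (c.toNat : Int) - 55
                   else (c.toNat : Int) - 48) * osn ^ p0) := by
        unfold pvStepA
        rw [hget]
        by_cases h65 : ((c.toNat : Int) ≥ 65) <;> simp [h65, Int.toNat_natCast]
      have hcongr : ∀ (st : Int × Int),
          (PySem.List.pyRange ((s.length : Int) - 1) (-1) (-1)).foldl (pvStepA (s ++ [c]) osn) st
          = (PySem.List.pyRange ((s.length : Int) - 1) (-1) (-1)).foldl (pvStepA s osn) st := by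
        intro st
        apply PySem.List.foldl_congr_mem
        intro b i hi
        rcases (PySem.List.mem_pyRange_neg_one).1 hi with ⟨h1, h2⟩
        have h0 : 0 ≤ i := by omega
        have hlt : i.toNat < s.length := by omega
        unfold pvStepA
        rw [PySem.List.pyGetD, PySem.List.pyGetD,
            PySem.List.pyGet?_of_nonneg _ h0, PySem.List.pyGet?_of_nonneg _ h0,
            List.getElem?_append_left hlt]
      rw [hcons, List.foldl_cons, hstep, hcongr, ih]
      have hH : pvHorner osn (s ++ [c])
          = pvHorner osn s * osn
            + (if ((c.toNat : Int) ≥ 65) then (c.toNat : Int) - 55 else (c.toNat : Int) - 48) := by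
        simp [pvHorner, List.foldl_append]
      rw [hH, Prod.mk.injEq]
      constructor
      · simp only [List.length_append, List.length_singleton]; push_cast; ring
      · ring

-- ===== VERDICT (by name: the statement is the Claim_ definition above) =====
theorem to_10_spec : Claim_equal_to_10 := by
  intro inp osn _
  show to_10 inp osn = to_10_alt inp osn
  unfold to_10 to_10_alt
  have h := pvFoldA osn inp.toList 0 0
  simp only [PySem.Str.len_eq]
  rw [show (PySem.List.pyRange ((inp.toList.length : Int) - 1) (-1) (-1)).foldl
        (fun (st : Int × Int) i =>
          let tmp : Int := (PySem.List.pyGetD inp.toList i ' ').toNat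
          if tmp ≥ 65 then (st.1 + 1, st.2 + (tmp - 55) * osn ^ st.1.toNat)
          else (st.1 + 1, st.2 + (tmp - 48) * osn ^ st.1.toNat)) ((0:Int), (0:Int))
      = (PySem.List.pyRange ((inp.toList.length : Int) - 1) (-1) (-1)).foldl
          (pvStepA inp.toList osn) (((0:Nat) : Int), (0:Int)) from rfl, h]
  simp [pvHorner]
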